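-- pv_equiv track=rewrite | github.com/ahostbr/DevTools | python/log_error_digest.py | extract_key_segment
-- ===== SOURCE A (Python) =====
-- KEYWORDS = [
--     "Error:",
--     "Fatal:",
--     "ensure(",
--     "ensureMsgf",
--     "check(",
--     "checkf(",
--     "Assertion failed",
-- ]
--
-- def extract_key_segment(line: str) -> str | None:
--     """
--     Returns the substring of 'line' beginning at the first error keyword,
--     or None if no keyword is found.
--     """
--     lowest_idx = None
--     for kw in KEYWORDS:
--         idx = line.find(kw)
--         if idx != -1:
--             if lowest_idx is None or idx < lowest_idx:
--                 lowest_idx = idx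
--     if lowest_idx is None:
--         return None
--     return line[lowest_idx:].strip()
-- ===== SOURCE B (Python) =====
-- KEYWORDS = [
--     "Error:",
--     "Fatal:",
--     "ensure(",
--     "ensureMsgf",
--     "check(",
--     "checkf(",
--     "Assertion failed",
-- ]
--
-- def extract_key_segment(line: str) -> str | None:
--     """Single left-to-right positional scan: return the trimmed suffix at the
--     first position where any keyword starts, or None."""
--     for i in range(len(line)):
--         if any(line.startswith(kw, i) for kw in KEYWORDS):
--             return line[i:].strip()
--     return None
-- ===== Notes on version B (the rewrite author's own statement) =====
-- stated objective: alternative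
-- what changed: Replaces the per-keyword line.find scans with a running minimum index by a single left-to-right positional scan (any + startswith with offset) that returns at the first offset where any keyword starts; not faster in wall time (pure-Python loop vs C-level find).
import Mathlib
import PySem

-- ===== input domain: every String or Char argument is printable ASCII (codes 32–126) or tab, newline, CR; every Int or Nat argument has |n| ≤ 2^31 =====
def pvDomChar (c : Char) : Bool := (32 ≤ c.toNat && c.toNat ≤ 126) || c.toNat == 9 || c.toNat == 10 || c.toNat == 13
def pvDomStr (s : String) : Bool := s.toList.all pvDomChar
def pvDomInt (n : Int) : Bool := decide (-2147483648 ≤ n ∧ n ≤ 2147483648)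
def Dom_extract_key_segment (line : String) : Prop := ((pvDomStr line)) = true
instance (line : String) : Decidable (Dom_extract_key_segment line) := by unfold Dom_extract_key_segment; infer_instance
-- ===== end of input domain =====

-- B replaces A's per-keyword full-line find scans + running minimum with one
-- left-to-right positional scan that stops at the first offset where any keyword starts.

def KEYWORDS : List String :=
  ["Error:", "Fatal:", "ensure(", "ensureMsgf", "check(", "checkf(", "Assertion failed"]

-- ===== PORT A =====
def extract_key_segment (line : String) : Option String :=
  let lowest : Option Int := KEYWORDS.foldl (fun lowest kw =>
      let idx := PySem.Str.find line kw
      if idx ≠ -1 then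
        match lowest with
        | none => some idx
        | some l => if idx < l then some idx else some l
      else lowest) none
  match lowest with
  | none => none
  | some m => some (PySem.Str.strip (PySem.Str.slice line (some m) none))

-- ===== PORT B =====
-- line.startswith(kw, i) with 0 ≤ i ≤ len(line) is exactly 'kw is a prefix of line[i:]';
-- the for-loop with early return is List.find? over range(len(line)).
def extract_key_segment_alt (line : String) : Option String :=
  match (List.range line.toList.length).find? (fun i =>
      KEYWORDS.any (fun kw => PySem.Chars.startswith (line.toList.drop i) kw.toList)) with
  | some i => some (PySem.Str.strip (PySem.Str.slice line (some (i : Int)) none))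
  | none => none

-- ===== PRECONDITION & SPEC =====
def Spec_extract_key_segment (line : String) (out : Option String) : Prop := out = extract_key_segment_alt line
instance (line : String) (out : Option String) : Decidable (Spec_extract_key_segment line out) := by unfold Spec_extract_key_segment; infer_instance

-- ===== CLAIM (what is proved, stated in full; the proofs are below) =====
def Claim_equal_extract_key_segment : Prop := ∀ (line : String), Dom_extract_key_segment line → Spec_extract_key_segment line (extract_key_segment line)

-- ===== LEMMAS AND PROOFS =====

-- A's fold, abstracted over the keyword list and accumulator.
def foldA (l : List Char) (ks : List String) (acc : Option Int) : Option Int :=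
  ks.foldl (fun lowest kw =>
      let idx := PySem.Chars.find l kw.toList
      if idx ≠ -1 then
        match lowest with
        | none => some idx
        | some lo => if idx < lo then some idx else some lo
      else lowest) acc

lemma foldA_acc_some (l : List Char) (ks : List String) (a : Int) :
    ∃ b, foldA l ks (some a) = some b := by
  induction ks generalizing a with
  | nil => exact ⟨a, rfl⟩
  | cons k t ih =>
    simp only [foldA, List.foldl_cons] at *
    by_cases h : PySem.Chars.find l k.toList = -1
    · rw [if_neg (by simp [h])]
      exact ih a
    · rw [if_pos h]
      split
      · exact ih _
      · exact ih _

lemma foldA_eq_none (l : List Char) (ks : List String) (acc : Option Int) :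
    foldA l ks acc = none ↔ acc = none ∧ ∀ kw ∈ ks, PySem.Chars.find l kw.toList = -1 := by
  induction ks generalizing acc with
  | nil => simp [foldA]
  | cons k t ih =>
    by_cases h : PySem.Chars.find l k.toList = -1
    · have hstep : foldA l (k :: t) acc = foldA l t acc := by
        simp only [foldA, List.foldl_cons]
        rw [if_neg (by simp [h])]
      rw [hstep, ih]
      constructor
      · rintro ⟨h1, h2⟩
        refine ⟨h1, fun kw hkw => ?_⟩
        rcases List.mem_cons.mp hkw with rfl | hkw
        · exact h
        · exact h2 kw hkw
      · rintro ⟨h1, h2⟩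
        exact ⟨h1, fun kw hkw => h2 kw (List.mem_cons_of_mem _ hkw)⟩
    · constructor
      · intro hres
        exfalso
        cases acc with
        | none =>
          have hstep : foldA l (k :: t) none = foldA l t (some (PySem.Chars.find l k.toList)) := by
            simp only [foldA, List.foldl_cons]
            rw [if_pos h]
          rw [hstep] at hres
          obtain ⟨b, hb⟩ := foldA_acc_some l t (PySem.Chars.find l k.toList)
          rw [hb] at hres; simp at hres
        | some a =>
          by_cases hlt : PySem.Chars.find l k.toList < a
          · have hstep : foldA l (k :: t) (some a) = foldA l t (some (PySem.Chars.find l k.toList)) := by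
              simp only [foldA, List.foldl_cons]
              rw [if_pos h, if_pos hlt]
            rw [hstep] at hres
            obtain ⟨b, hb⟩ := foldA_acc_some l t (PySem.Chars.find l k.toList)
            rw [hb] at hres; simp at hres
          · have hstep : foldA l (k :: t) (some a) = foldA l t (some a) := by
              simp only [foldA, List.foldl_cons]
              rw [if_pos h, if_neg hlt]
            rw [hstep] at hres
            obtain ⟨b, hb⟩ := foldA_acc_some l t a
            rw [hb] at hres; simp at hres
      · rintro ⟨-, h2⟩
        exact absurd (h2 k List.mem_cons_self) h

lemma foldA_eq_some (l : List Char) (ks : List String) (acc : Option Int) (m : Int)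
    (h : foldA l ks acc = some m) :
    (acc = some m ∨ ∃ kw ∈ ks, PySem.Chars.find l kw.toList = m) ∧
    (∀ a, acc = some a → m ≤ a) ∧
    (∀ kw ∈ ks, PySem.Chars.find l kw.toList = -1 ∨ m ≤ PySem.Chars.find l kw.toList) ∧
    ((acc = none ∨ ∃ a, acc = some a ∧ 0 ≤ a) → 0 ≤ m) := by
  induction ks generalizing acc with
  | nil =>
    simp only [foldA, List.foldl_nil] at h
    subst h
    refine ⟨Or.inl rfl, fun a ha => by injection ha with ha; omega, by simp, ?_⟩
    rintro (hc | ⟨a, ha, ha0⟩)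
    · simp at hc
    · injection ha with ha; omega
  | cons k t ih =>
    have hge : PySem.Chars.find l k.toList = -1 ∨ 0 ≤ PySem.Chars.find l k.toList := by
      have := PySem.Chars.neg_one_le_find l k.toList
      omega
    by_cases hf : PySem.Chars.find l k.toList = -1
    · have hstep : foldA l (k :: t) acc = foldA l t acc := by
        simp only [foldA, List.foldl_cons]
        rw [if_neg (by simp [hf])]
      rw [hstep] at h
      obtain ⟨h1, h2, h3, h4⟩ := ih _ h
      refine ⟨?_, h2, ?_, h4⟩
      · rcases h1 with h1 | ⟨kw, hkw, hm⟩
        · exact Or.inl h1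
        · exact Or.inr ⟨kw, List.mem_cons_of_mem _ hkw, hm⟩
      · intro kw hkw
        rcases List.mem_cons.mp hkw with rfl | hkw
        · exact Or.inl hf
        · exact h3 kw hkw
    · have hf0 : 0 ≤ PySem.Chars.find l k.toList := by rcases hge with hc | hc; exact absurd hc hf; exact hc
      cases acc with
      | none =>
        have hstep : foldA l (k :: t) none = foldA l t (some (PySem.Chars.find l k.toList)) := by
          simp only [foldA, List.foldl_cons]; rw [if_pos hf]
        rw [hstep] at h
        obtain ⟨h1, h2, h3, h4⟩ := ih _ h
        have hmk : m ≤ PySem.Chars.find l k.toList := h2 _ rfl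
        have hm0 : 0 ≤ m := h4 (Or.inr ⟨_, rfl, hf0⟩)
        refine ⟨?_, by simp, ?_, fun _ => hm0⟩
        · rcases h1 with h1 | ⟨kw, hkw, hm⟩
          · exact Or.inr ⟨k, List.mem_cons_self, Option.some.inj h1⟩
          · exact Or.inr ⟨kw, List.mem_cons_of_mem _ hkw, hm⟩
        · intro kw hkw
          rcases List.mem_cons.mp hkw with rfl | hkw
          · exact Or.inr hmk
          · exact h3 kw hkw
      | some a =>
        by_cases hlt : PySem.Chars.find l k.toList < a
        · have hstep : foldA l (k :: t) (some a) = foldA l t (some (PySem.Chars.find l k.toList)) := by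
            simp only [foldA, List.foldl_cons]; rw [if_pos hf, if_pos hlt]
          rw [hstep] at h
          obtain ⟨h1, h2, h3, h4⟩ := ih _ h
          have hmk : m ≤ PySem.Chars.find l k.toList := h2 _ rfl
          refine ⟨?_, ?_, ?_, fun _ => h4 (Or.inr ⟨_, rfl, hf0⟩)⟩
          · rcases h1 with h1 | ⟨kw, hkw, hm⟩
            · exact Or.inr ⟨k, List.mem_cons_self, Option.some.inj h1⟩
            · exact Or.inr ⟨kw, List.mem_cons_of_mem _ hkw, hm⟩
          · intro a' ha'; injection ha' with ha'; omega
          · intro kw hkw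
            rcases List.mem_cons.mp hkw with rfl | hkw
            · exact Or.inr hmk
            · exact h3 kw hkw
        · have hstep : foldA l (k :: t) (some a) = foldA l t (some a) := by
            simp only [foldA, List.foldl_cons]; rw [if_pos hf, if_neg hlt]
          rw [hstep] at h
          obtain ⟨h1, h2, h3, h4⟩ := ih _ h
          have hma : m ≤ a := h2 _ rfl
          refine ⟨?_, ?_, ?_, ?_⟩
          · rcases h1 with h1 | ⟨kw, hkw, hm⟩
            · exact Or.inl h1
            · exact Or.inr ⟨kw, List.mem_cons_of_mem _ hkw, hm⟩
          · intro a' ha'; injection ha' with ha'; omega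
          · intro kw hkw
            rcases List.mem_cons.mp hkw with rfl | hkw
            · exact Or.inr (by omega)
            · exact h3 kw hkw
          · rintro (hc | ⟨a', ha', ha0⟩)
            · simp at hc
            · exact h4 (Or.inr ⟨a, rfl, by injection ha' with ha'; omega⟩)

-- B's predicate at position i
def hitAt (l : List Char) (i : Nat) : Bool :=
  KEYWORDS.any (fun kw => PySem.Chars.startswith (l.drop i) kw.toList)

lemma find?_range_eq_some (i : Nat) (p : Nat → Bool)
    (hp : p i = true) (hmin : ∀ j < i, p j = false) :
    ∀ n, i < n → (List.range n).find? p = some i := by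
  intro n
  induction n with
  | zero => omega
  | succ n ih =>
    intro hin
    rw [List.range_succ, List.find?_append]
    rcases Nat.lt_or_ge i n with h | h
    · rw [ih h, Option.some_or]
    · have hi : i = n := by omega
      have hnone : (List.range n).find? p = none := by
        rw [List.find?_eq_none]
        intro x hx
        have hx' : x < i := by rw [hi]; exact List.mem_range.mp hx
        simp [hmin x hx']
      rw [hnone, Option.none_or, hi]
      simp [show p n = true from hi ▸ hp]

lemma keywords_ne_nil : ∀ kw ∈ KEYWORDS, kw.toList ≠ [] := by decide

theorem extract_key_segment_eq (line : String) :
    extract_key_segment line = extract_key_segment_alt line := by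
  unfold extract_key_segment extract_key_segment_alt
  have hfold : KEYWORDS.foldl (fun lowest kw =>
      let idx := PySem.Str.find line kw
      if idx ≠ -1 then
        match lowest with
        | none => some idx
        | some lo => if idx < lo then some idx else some lo
      else lowest) none = foldA line.toList KEYWORDS none := by
    simp [foldA, PySem.Str.find_eq]
  rw [hfold]
  rcases h : foldA line.toList KEYWORDS none with _ | m
  · -- A found nothing: no keyword occurs anywhere
    have hnone := (foldA_eq_none line.toList KEYWORDS none).mp h
    have hB : (List.range line.toList.length).find? (fun i => hitAt line.toList i) = none := by
      rw [List.find?_eq_none]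
      intro i _
      rw [Bool.not_eq_true, hitAt, List.any_eq_false]
      intro kw hkw hsw
      have hpre := (PySem.Chars.startswith_iff _ _).mp hsw
      have hinf : kw.toList <:+: line.toList := List.infix_iff_prefix_suffix.mpr
        ⟨line.toList.drop i, hpre, List.drop_suffix i line.toList⟩
      exact (PySem.Chars.find_eq_neg_one_iff line.toList kw.toList).mp (hnone.2 kw hkw) hinf
    simp only [hitAt] at hB
    rw [hB]
  · -- A found minimum index m
    obtain ⟨h1, -, h3, h4⟩ := foldA_eq_some line.toList KEYWORDS none m h
    have hmnn : 0 ≤ m := h4 (Or.inl rfl)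
    rcases h1 with h1 | ⟨kw, hkw, hm⟩
    · exact absurd h1 (by simp)
    have hnn : 0 ≤ PySem.Chars.find line.toList kw.toList := by rw [hm]; exact hmnn
    have hspec := PySem.Chars.find_spec (s := line.toList) (sub := kw.toList) hnn
    have hpre : kw.toList <+: line.toList.drop m.toNat := by
      have := hspec.1
      rwa [hm] at this
    have hlen : m.toNat < line.toList.length := by
      by_contra hge
      rw [Nat.not_lt] at hge
      rw [List.drop_eq_nil_of_le hge] at hpre
      exact keywords_ne_nil kw hkw (List.prefix_nil.mp hpre)
    have hhit : hitAt line.toList m.toNat = true := by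
      rw [hitAt, List.any_eq_true]
      exact ⟨kw, hkw, (PySem.Chars.startswith_iff _ _).mpr hpre⟩
    have hmin : ∀ j < m.toNat, hitAt line.toList j = false := by
      intro j hj
      rw [Bool.eq_false_iff]
      intro hcon
      rw [hitAt, List.any_eq_true] at hcon
      obtain ⟨kw', hkw', hsw⟩ := hcon
      have hpre' := (PySem.Chars.startswith_iff _ _).mp hsw
      have hinf' : kw'.toList <:+: line.toList := List.infix_iff_prefix_suffix.mpr
        ⟨line.toList.drop j, hpre', List.drop_suffix j line.toList⟩
      rcases h3 kw' hkw' with hc | hle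
      · exact (PySem.Chars.find_eq_neg_one_iff line.toList kw'.toList).mp hc hinf'
      · have hnn' : 0 ≤ PySem.Chars.find line.toList kw'.toList :=
          (PySem.Chars.find_nonneg_iff line.toList kw'.toList).mpr hinf'
        have hspec' := PySem.Chars.find_spec (s := line.toList) (sub := kw'.toList) hnn'
        exact hspec'.2 j (by omega) hpre'
    have hB := find?_range_eq_some m.toNat (fun i => hitAt line.toList i) hhit hmin
      line.toList.length hlen
    simp only [hitAt] at hB
    rw [hB]
    have hcast : (m.toNat : Int) = m := by omega
    simp [hcast]

-- ===== VERDICT (by name: the statement is the Claim_ definition above) =====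
theorem extract_key_segment_spec : Claim_equal_extract_key_segment := by
  intro line _
  unfold Spec_extract_key_segment
  exact extract_key_segment_eq line
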